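-- pv_equiv track=rewrite | github.com/ryanmcalpine/CS415_Project_02 | main.py | get_array_str
-- ===== SOURCE A (Python) =====
-- def get_array_str( A ):
--     padRemoved = 0
--     S = ""
--
--     for n in A:
--         if n != 0:
--             padRemoved = 1
--         if padRemoved == 1:
--             S += str(n)
--
--     if len(S) == 0:
--         S += "0"
--
--     return S
-- ===== SOURCE B (Python) =====
-- def get_array_str(A):
--     i = 0
--     while i < len(A) and A[i] == 0:
--         i += 1
--     s = "".join(str(n) for n in A[i:])
--     return s if s else "0"
-- ===== Notes on version B (the rewrite author's own statement) =====
-- stated objective: simpler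
-- what changed: Replaces the interleaved padRemoved flag and per-element conditional append by a separate scan for the first non-zero index followed by a single join over the remaining suffix.
import Mathlib
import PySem

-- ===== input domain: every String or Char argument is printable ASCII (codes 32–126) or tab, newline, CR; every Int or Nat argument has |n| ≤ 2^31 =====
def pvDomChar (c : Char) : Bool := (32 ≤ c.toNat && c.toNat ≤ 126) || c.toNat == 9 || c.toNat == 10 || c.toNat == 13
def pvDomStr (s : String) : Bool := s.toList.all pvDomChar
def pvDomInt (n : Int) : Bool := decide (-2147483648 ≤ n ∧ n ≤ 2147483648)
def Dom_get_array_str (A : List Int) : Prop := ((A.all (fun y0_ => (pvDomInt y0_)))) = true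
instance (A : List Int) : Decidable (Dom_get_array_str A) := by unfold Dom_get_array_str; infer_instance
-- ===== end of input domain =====

-- B replaces A's interleaved padRemoved flag by a separate scan for the first
-- non-zero element followed by a single join of the remaining suffix (objective: simpler).


-- ===== PORT A =====
-- one loop iteration: flip padRemoved on a non-zero element, append str(n) once flipped
def gasStep (st : Int × String) (n : Int) : Int × String :=
  let padRemoved := if n ≠ 0 then 1 else st.1
  let S := if padRemoved = 1 then st.2 ++ PySem.Int.toStr n else st.2
  (padRemoved, S)

def get_array_str (A : List Int) : String :=
  let st := A.foldl gasStep (0, "")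
  if PySem.Str.len st.2 = 0 then st.2 ++ "0" else st.2

-- ===== PORT B =====
def get_array_str_alt (A : List Int) : String :=
  let rest := A.dropWhile (fun n => n == 0)   -- the index-advancing while loop of Source B
  let s := PySem.Str.join "" (rest.map PySem.Int.toStr)
  if s = "" then "0" else s

-- ===== PRECONDITION & SPEC =====
def Spec_get_array_str (A : List Int) (out : String) : Prop := out = get_array_str_alt A
instance (A : List Int) (out : String) : Decidable (Spec_get_array_str A out) := by unfold Spec_get_array_str; infer_instance

-- ===== CLAIM (what is proved, stated in full; the proofs are below) =====
def Claim_equal_get_array_str : Prop := ∀ (A : List Int), Dom_get_array_str A → Spec_get_array_str A (get_array_str A)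

-- ===== LEMMAS AND PROOFS =====

theorem join0_nil : PySem.Str.join "" ([] : List String) = "" := by
  apply String.toList_inj.mp
  simp [PySem.Str.toList_join, PySem.Chars.join, List.intercalate]

theorem join0_cons (x : String) (xs : List String) :
    PySem.Str.join "" (x :: xs) = x ++ PySem.Str.join "" xs := by
  apply String.toList_inj.mp
  simp only [PySem.Str.toList_join, List.map_cons]
  cases xs with
  | nil => simp [PySem.Chars.join_singleton, PySem.Chars.join_nil]
  | cons m ms =>
      have h0 : "".toList = ([] : List Char) := rfl
      rw [h0]
      simp only [List.map_cons]
      rw [PySem.Chars.join_cons_cons]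
      simp [PySem.Str.toList_join, h0]

-- once padRemoved is 1, the loop appends str(n) for every remaining element
theorem gas_fold_after (A : List Int) : ∀ (s : String),
    A.foldl gasStep (1, s) = (1, s ++ PySem.Str.join "" (A.map PySem.Int.toStr)) := by
  induction A with
  | nil => intro s; simp [join0_nil]
  | cons n t ih =>
      intro s
      have hstep : gasStep (1, s) n = (1, s ++ PySem.Int.toStr n) := by
        simp [gasStep]
      simp only [List.foldl_cons, hstep, ih, List.map_cons, join0_cons,
        String.append_assoc]

-- the whole loop: drop the leading zeros, then concatenate everything
theorem gas_fold_main (A : List Int) :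
    A.foldl gasStep (0, "") =
      (if (A.dropWhile (fun n => n == 0)) = [] then ((0 : Int), "")
       else (1, PySem.Str.join "" ((A.dropWhile (fun n => n == 0)).map PySem.Int.toStr))) := by
  induction A with
  | nil => simp
  | cons n t ih =>
      by_cases hn : n = 0
      · subst hn
        have hstep : gasStep (0, "") 0 = (0, "") := by simp [gasStep]
        simp only [List.foldl_cons, hstep, ih, List.dropWhile_cons, beq_self_eq_true, if_true]
      · have hstep : gasStep (0, "") n = (1, PySem.Int.toStr n) := by
          simp [gasStep, hn]
        have hdw : (n :: t).dropWhile (fun n => n == 0) = n :: t := by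
          simp [hn]
        simp only [List.foldl_cons, hstep, gas_fold_after, hdw, List.map_cons, join0_cons]
        simp

-- the second component of the loop state is always B's join
theorem gas_snd (A : List Int) :
    (A.foldl gasStep (0, "")).2 =
      PySem.Str.join "" ((A.dropWhile (fun n => n == 0)).map PySem.Int.toStr) := by
  rw [gas_fold_main]
  split_ifs with h
  · rw [h]; simp [join0_nil]
  · rfl

-- ===== VERDICT (by name: the statement is the Claim_ definition above) =====
theorem get_array_str_spec : Claim_equal_get_array_str := by
  intro A _
  unfold Spec_get_array_str get_array_str get_array_str_alt
  simp only [gas_snd]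
  set s := PySem.Str.join "" ((A.dropWhile (fun n => n == 0)).map PySem.Int.toStr) with hs
  have hlen : PySem.Str.len s = 0 ↔ s = "" := by
    rw [PySem.Str.len_eq]
    constructor
    · intro h
      have : s.length = 0 := by exact_mod_cast h
      exact String.length_eq_zero_iff.mp this
    · intro h; rw [h]; simp
  by_cases he : s = ""
  · rw [if_pos (hlen.mpr he), if_pos he, he]; rfl
  · rw [if_neg (fun h => he (hlen.mp h)), if_neg he]
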